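-- pv_equiv track=rewrite | github.com/galsrv/labeling | src/weighing_service/scales/tenzo_m/utils.py | _crc_step
-- ===== SOURCE A (Python) =====
-- def _crc_step(b_input: int, b_crc: int) -> int:
--     """Perform one CRC step according to the protocol's assembler algorithm.
--
--     Equivalent to the original CRCMaker(b_input, b_CRC).
--     """
--     al = b_input
--     ah = b_crc
--
--     for _ in range(8):
--         # Rotate AL left through carry
--         carry_al = (al >> 7) & 1
--         al = ((al << 1) & 0xFF) | carry_al
--
--         # Rotate AH left through carry (using AL's carry)
--         carry_ah = (ah >> 7) & 1
--         ah = ((ah << 1) & 0xFF) | carry_al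
--
--         # If there was carry from AH rotation → XOR with 0x69
--         if carry_ah:
--             ah ^= 0x69
--
--     return ah & 0xFF
-- ===== SOURCE B (Python) =====
-- def _crc_step(b_input: int, b_crc: int) -> int:
--     """One protocol CRC step, computed as polynomial long division over GF(2).
--
--     The protocol's rotate-based routine is an LFSR for the generator
--     x^8 + x^6 + x^5 + x^3 + 1 (0x169).  Appending the data byte to the
--     current CRC byte and reducing the resulting 16-bit word modulo the
--     generator, most significant bit first, yields the same CRC byte.
--     """
--     m = ((b_crc & 0xFF) << 8) | (b_input & 0xFF)
--     for i in range(15, 7, -1):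
--         if (m >> i) & 1:
--             m ^= 0x169 << (i - 8)
--     return m
-- ===== Notes on version B (the rewrite author's own statement) =====
-- stated objective: alternative
-- what changed: Replaces the two-register rotate-through-carry emulation (AL data register rotated to feed carries into the AH CRC register, with conditional XOR per step) by textbook polynomial long division over GF(2): build the 16-bit word (crc byte || data byte) and reduce it modulo the generator 0x169 from bit 15 down to bit 8.
import Mathlib
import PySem

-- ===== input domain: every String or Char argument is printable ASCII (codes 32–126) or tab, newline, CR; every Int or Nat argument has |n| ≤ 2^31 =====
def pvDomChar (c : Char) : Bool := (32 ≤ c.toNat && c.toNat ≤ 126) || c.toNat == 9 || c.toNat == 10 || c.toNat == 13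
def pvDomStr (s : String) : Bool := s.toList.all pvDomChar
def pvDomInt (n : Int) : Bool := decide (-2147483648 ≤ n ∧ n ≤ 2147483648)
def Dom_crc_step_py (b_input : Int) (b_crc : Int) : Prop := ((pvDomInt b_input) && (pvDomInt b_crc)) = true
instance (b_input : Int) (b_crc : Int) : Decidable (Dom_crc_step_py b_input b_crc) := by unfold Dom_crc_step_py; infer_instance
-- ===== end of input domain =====

-- B replaces A's two-register rotate-through-carry loop by polynomial long division
-- over GF(2) with the generator 0x169 (alternative formulation, same cost).

-- ===== PORT A =====
-- one pass of A's for-body: rotate AL through carry, rotate AH taking AL's carry,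
-- conditionally XOR with 0x69
def crcStepA (s : Int × Int) : Int × Int :=
  let carry_al := PySem.Int.band (s.1 >>> (7 : Nat)) 1
  let al := PySem.Int.bor (PySem.Int.band (s.1 <<< (1 : Nat)) 255) carry_al
  let carry_ah := PySem.Int.band (s.2 >>> (7 : Nat)) 1
  let ah := PySem.Int.bor (PySem.Int.band (s.2 <<< (1 : Nat)) 255) carry_al
  let ah := if carry_ah ≠ 0 then PySem.Int.bxor ah 0x69 else ah
  (al, ah)

def crc_step_py (b_input : Int) (b_crc : Int) : Int :=
  let st := (List.range 8).foldl (fun s _ => crcStepA s) (b_input, b_crc)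
  PySem.Int.band st.2 255

-- ===== PORT B =====
-- one reduction step of Source B's loop body; B's loop only ever passes i ∈ [8,15],
-- where `i.toNat` is exact for Python's `m >> i` / `<< (i - 8)`
def crcRedB (m : Int) (i : Int) : Int :=
  if PySem.Int.band (m >>> i.toNat) 1 ≠ 0 then PySem.Int.bxor m ((0x169 : Int) <<< (i.toNat - 8)) else m

def crc_step_py_alt (b_input : Int) (b_crc : Int) : Int :=
  let m := PySem.Int.bor ((PySem.Int.band b_crc 255) <<< (8 : Nat)) (PySem.Int.band b_input 255)
  (PySem.List.pyRange 15 7 (-1)).foldl crcRedB m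

-- ===== PRECONDITION & SPEC =====
def Spec_crc_step_py (b_input : Int) (b_crc : Int) (out : Int) : Prop := out = crc_step_py_alt b_input b_crc
instance (b_input : Int) (b_crc : Int) (out : Int) : Decidable (Spec_crc_step_py b_input b_crc out) := by unfold Spec_crc_step_py; infer_instance

-- ===== CLAIM =====
def Claim_equal_crc_step_py : Prop := ∀ (b_input : Int) (b_crc : Int), Dom_crc_step_py b_input b_crc → Spec_crc_step_py b_input b_crc (crc_step_py b_input b_crc)

-- ===== LEMMAS AND PROOFS =====

-- bridges from PySem's Python-exact primitives to plain arithmetic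
theorem pv_band255 (a : Int) : PySem.Int.band a 255 = a % 256 := by
  unfold PySem.Int.band
  split
  · rw [show (255 : Int).toNat = 2 ^ 8 - 1 from rfl, Nat.and_two_pow_sub_one_eq_mod]
    omega
  · split
    · rw [show (255 : Int).toNat = (255 : Nat) from rfl, Nat.land_comm,
        show (255 : Nat) = 2 ^ 8 - 1 from rfl, Nat.and_two_pow_sub_one_eq_mod]
      omega
    · omega

theorem pv_band1 (a : Int) : PySem.Int.band a 1 = a % 2 := by
  unfold PySem.Int.band
  split
  · rw [show (1 : Int).toNat = 2 ^ 1 - 1 from rfl, Nat.and_two_pow_sub_one_eq_mod]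
    omega
  · split
    · rw [show (1 : Int).toNat = (1 : Nat) from rfl, Nat.land_comm,
        show (1 : Nat) = 2 ^ 1 - 1 from rfl, Nat.and_two_pow_sub_one_eq_mod]
      omega
    · omega

theorem pv_shr7 (a : Int) : a >>> (7 : Nat) = a / 128 := by
  rw [Int.shiftRight_eq_div_pow]; norm_num

theorem pv_shl1 (a : Int) : a <<< (1 : Nat) = a * 2 := by
  rw [Int.shiftLeft_eq]; norm_num

-- disjoint-digit fact over Nat: XOR respects a base-2^t digit split
theorem pv_xor_digit (t u v a b : Nat) (ha : a < 2 ^ t) (hb : b < 2 ^ t) :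
    (2 ^ t * u + a) ^^^ (2 ^ t * v + b) = 2 ^ t * (u ^^^ v) + (a ^^^ b) := by
  apply Nat.eq_of_testBit_eq
  intro j
  rw [Nat.testBit_two_pow_mul_add _ (Nat.xor_lt_two_pow ha hb) j, Nat.testBit_xor,
    Nat.testBit_two_pow_mul_add _ ha j, Nat.testBit_two_pow_mul_add _ hb j,
    Nat.testBit_xor, Nat.testBit_xor]
  split <;> rfl

-- PySem.Int.bor of an even number and a single bit is addition
theorem pv_bor_even_bit (u c : Nat) (hc : c < 2) :
    PySem.Int.bor ((2 * u : Nat) : Int) ((c : Nat) : Int) = ((2 * u + c : Nat) : Int) := by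
  rw [PySem.Int.bor_natCast]
  congr 1
  rw [show (2 * u : Nat) = 2 ^ 1 * u from by ring, ← Nat.two_pow_add_eq_or_of_lt (by omega)]

-- the shared byte-level CRC step: new = old·2 mod 256 + data bit, XOR 0x69 on carry out
def pvG (d y : Nat) : Nat := if 128 ≤ y then (2 * y % 256 + d) ^^^ 105 else 2 * y % 256 + d

theorem pvG_lt (d y : Nat) (hd : d < 2) (_hy : y < 256) : pvG d y < 256 := by
  unfold pvG
  split
  · exact Nat.xor_lt_two_pow (n := 8) (by omega) (by omega)
  · omega

-- A's loop body on byte-sized naturals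
theorem pv_stepA (x y : Nat) (hx : x < 256) (_hy : y < 256) :
    crcStepA ((x : Int), (y : Int)) =
      (((2 * x % 256 + x / 128 : Nat) : Int), ((pvG (x / 128) y : Nat) : Int)) := by
  unfold crcStepA
  simp only [pv_shr7, pv_shl1, pv_band1, pv_band255]
  have hcal : ((x : Int) / 128 % 2) = ((x / 128 : Nat) : Int) := by push_cast; omega
  have hal : ((x : Int) * 2 % 256) = ((2 * (x % 128) : Nat) : Int) := by push_cast; omega
  have hah : ((y : Int) * 2 % 256) = ((2 * (y % 128) : Nat) : Int) := by push_cast; omega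
  rw [hcal, hal, hah, pv_bor_even_bit _ _ (by omega), pv_bor_even_bit _ _ (by omega)]
  by_cases hc : 128 ≤ y
  · have hcond : ((y : Int) / 128 % 2) ≠ 0 := by omega
    rw [if_pos hcond, show (0x69 : Int) = ((105 : Nat) : Int) from rfl, PySem.Int.bxor_natCast]
    simp only [Prod.mk.injEq]
    refine ⟨by push_cast; omega, ?_⟩
    unfold pvG
    rw [if_pos hc]
    norm_cast
    congr 1
    omega
  · have hcond : ¬ ((y : Int) / 128 % 2) ≠ 0 := by omega
    rw [if_neg hcond]
    simp only [Prod.mk.injEq]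
    refine ⟨by push_cast; omega, ?_⟩
    unfold pvG
    rw [if_neg hc]
    push_cast
    omega

-- B's loop body: reduction at bit t'+8 of the word 2^(t'+1)·X + (2^t'·d + L)
theorem pv_stepB (t' X d L : Nat) (ht : t' < 8) (hX : X < 256) (hd : d < 2) (hL : L < 2 ^ t') :
    crcRedB (((2 ^ (t' + 1) * X + (2 ^ t' * d + L) : Nat) : Int)) ((t' + 8 : Nat) : Int) =
      ((2 ^ t' * pvG d X + L : Nat) : Int) := by
  have hlow : 2 ^ t' * d + L < 2 ^ (t' + 1) := by
    rw [pow_succ]; interval_cases d <;> omega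
  have hdiv : (2 ^ (t' + 1) * X + (2 ^ t' * d + L)) / 2 ^ (t' + 8) = X / 128 := by
    have : (2 ^ (t' + 8) : Nat) = 2 ^ (t' + 1) * 128 := by ring
    rw [this, ← Nat.div_div_eq_div_mul, Nat.mul_add_div (by positivity), Nat.div_eq_of_lt hlow,
      Nat.add_zero]
  unfold crcRedB
  rw [Int.toNat_natCast, Int.shiftRight_eq_div_pow, pv_band1]
  have hc : ((2 ^ (t' + 1) * X + (2 ^ t' * d + L) : Nat) : Int) / ((2 ^ (t' + 8) : Nat) : Int) % 2
      = (((2 ^ (t' + 1) * X + (2 ^ t' * d + L)) / 2 ^ (t' + 8) % 2 : Nat) : Int) := by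
    omega
  rw [hc, hdiv]
  by_cases hb7 : 128 ≤ X
  · have : ((X / 128 % 2 : Nat) : Int) ≠ 0 := by omega
    rw [if_pos this, show t' + 8 - 8 = t' from by omega, Int.shiftLeft_eq,
      show ((0x169 : Int) * 2 ^ t') = (((361 * 2 ^ t' : Nat)) : Int) from by push_cast; ring,
      PySem.Int.bxor_natCast]
    congr 1
    have e1 : 2 ^ (t' + 1) * X + (2 ^ t' * d + L) = 2 ^ t' * (2 * X + d) + L := by
      rw [pow_succ]; ring
    have e2 : (361 * 2 ^ t' : Nat) = 2 ^ t' * 361 + 0 := by ring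
    rw [e1, e2, pv_xor_digit t' _ _ _ _ hL (by omega), Nat.xor_zero]
    have e3 : 2 * X + d = 2 ^ 8 * 1 + (2 * X % 256 + d) := by omega
    have e4 : (361 : Nat) = 2 ^ 8 * 1 + 105 := by norm_num
    rw [e3, e4, pv_xor_digit 8 _ _ _ _ (by omega) (by omega)]
    unfold pvG
    rw [if_pos hb7]
    norm_num
  · have : ¬ ((X / 128 % 2 : Nat) : Int) ≠ 0 := by omega
    rw [if_neg this]
    congr 1
    unfold pvG
    rw [if_neg hb7, pow_succ, Nat.mod_eq_of_lt (by omega)]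
    ring

-- the common normal form both ports reach on byte inputs:
-- feed the data bits of n into pvG most significant first, starting from crc byte m
def pvChain (n m : Nat) : Nat :=
  pvG (n % 2) (pvG (n / 2 % 2) (pvG (n / 4 % 2) (pvG (n / 8 % 2)
    (pvG (n / 16 % 2) (pvG (n / 32 % 2) (pvG (n / 64 % 2) (pvG (n / 128) m)))))))

-- closed rotation forms of A's AL register and the carries it emits (byte-sized inputs)
set_option maxRecDepth 10000 in
theorem pv_t1 : ∀ n, n < 256 → 2 * n % 256 + n / 128 = n % 128 * 2 + n / 128 := by decide
set_option maxRecDepth 10000 in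
theorem pv_c1 : ∀ n, n < 256 → (n % 128 * 2 + n / 128) / 128 = n / 64 % 2 := by decide
set_option maxRecDepth 10000 in
theorem pv_t2 : ∀ n, n < 256 → 2 * (n % 128 * 2 + n / 128) % 256 + n / 64 % 2 = n % 64 * 4 + n / 64 := by decide
set_option maxRecDepth 10000 in
theorem pv_c2 : ∀ n, n < 256 → (n % 64 * 4 + n / 64) / 128 = n / 32 % 2 := by decide
set_option maxRecDepth 10000 in
theorem pv_t3 : ∀ n, n < 256 → 2 * (n % 64 * 4 + n / 64) % 256 + n / 32 % 2 = n % 32 * 8 + n / 32 := by decide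
set_option maxRecDepth 10000 in
theorem pv_c3 : ∀ n, n < 256 → (n % 32 * 8 + n / 32) / 128 = n / 16 % 2 := by decide
set_option maxRecDepth 10000 in
theorem pv_t4 : ∀ n, n < 256 → 2 * (n % 32 * 8 + n / 32) % 256 + n / 16 % 2 = n % 16 * 16 + n / 16 := by decide
set_option maxRecDepth 10000 in
theorem pv_c4 : ∀ n, n < 256 → (n % 16 * 16 + n / 16) / 128 = n / 8 % 2 := by decide
set_option maxRecDepth 10000 in
theorem pv_t5 : ∀ n, n < 256 → 2 * (n % 16 * 16 + n / 16) % 256 + n / 8 % 2 = n % 8 * 32 + n / 8 := by decide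
set_option maxRecDepth 10000 in
theorem pv_c5 : ∀ n, n < 256 → (n % 8 * 32 + n / 8) / 128 = n / 4 % 2 := by decide
set_option maxRecDepth 10000 in
theorem pv_t6 : ∀ n, n < 256 → 2 * (n % 8 * 32 + n / 8) % 256 + n / 4 % 2 = n % 4 * 64 + n / 4 := by decide
set_option maxRecDepth 10000 in
theorem pv_c6 : ∀ n, n < 256 → (n % 4 * 64 + n / 4) / 128 = n / 2 % 2 := by decide
set_option maxRecDepth 10000 in
theorem pv_t7 : ∀ n, n < 256 → 2 * (n % 4 * 64 + n / 4) % 256 + n / 2 % 2 = n % 2 * 128 + n / 2 := by decide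
set_option maxRecDepth 10000 in
theorem pv_c7 : ∀ n, n < 256 → (n % 2 * 128 + n / 2) / 128 = n % 2 := by decide

theorem pv_portA (n m : Nat) (hn : n < 256) (hm : m < 256) :
    crc_step_py (n : Int) (m : Int) = ((pvChain n m : Nat) : Int) := by
  unfold crc_step_py
  rw [show List.range 8 = [0, 1, 2, 3, 4, 5, 6, 7] from rfl]
  simp only [List.foldl_cons, List.foldl_nil]
  rw [pv_stepA n m hn hm, pv_t1 n hn]
  have h1 := pvG_lt (n / 128) m (by omega) hm
  rw [pv_stepA _ _ (by omega) h1, pv_c1 n hn, pv_t2 n hn]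
  have h2 := pvG_lt _ _ (show n / 64 % 2 < 2 from by omega) h1
  rw [pv_stepA _ _ (by omega) h2, pv_c2 n hn, pv_t3 n hn]
  have h3 := pvG_lt _ _ (show n / 32 % 2 < 2 from by omega) h2
  rw [pv_stepA _ _ (by omega) h3, pv_c3 n hn, pv_t4 n hn]
  have h4 := pvG_lt _ _ (show n / 16 % 2 < 2 from by omega) h3
  rw [pv_stepA _ _ (by omega) h4, pv_c4 n hn, pv_t5 n hn]
  have h5 := pvG_lt _ _ (show n / 8 % 2 < 2 from by omega) h4
  rw [pv_stepA _ _ (by omega) h5, pv_c5 n hn, pv_t6 n hn]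
  have h6 := pvG_lt _ _ (show n / 4 % 2 < 2 from by omega) h5
  rw [pv_stepA _ _ (by omega) h6, pv_c6 n hn, pv_t7 n hn]
  have h7 := pvG_lt _ _ (show n / 2 % 2 < 2 from by omega) h6
  rw [pv_stepA _ _ (by omega) h7, pv_c7 n hn]
  have h8 := pvG_lt _ _ (show n % 2 < 2 from by omega) h7
  rw [pv_band255]
  unfold pvChain
  omega

theorem pv_portB (n m : Nat) (hn : n < 256) (hm : m < 256) :
    crc_step_py_alt (n : Int) (m : Int) = ((pvChain n m : Nat) : Int) := by
  unfold crc_step_py_alt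
  rw [show PySem.List.pyRange 15 7 (-1) = [15, 14, 13, 12, 11, 10, 9, 8] from by decide]
  simp only [List.foldl_cons, List.foldl_nil, pv_band255]
  rw [show ((m : Int) % 256) = ((m : Nat) : Int) from by omega,
    show ((n : Int) % 256) = ((n : Nat) : Int) from by omega,
    Int.shiftLeft_eq,
    show ((m : Nat) : Int) * 2 ^ 8 = ((2 ^ 8 * m : Nat) : Int) from by push_cast; ring,
    PySem.Int.bor_natCast, ← Nat.two_pow_add_eq_or_of_lt (show n < 2 ^ 8 from hn)]
  rw [show 2 ^ 8 * m + n = 2 ^ (7 + 1) * m + (2 ^ 7 * (n / 128) + n % 128) from by omega,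
    show (15 : Int) = ((7 + 8 : Nat) : Int) from by norm_num,
    pv_stepB 7 m (n / 128) (n % 128) (by omega) hm (by omega) (by omega)]
  have h1 := pvG_lt (n / 128) m (by omega) hm
  rw [show 2 ^ 7 * pvG (n / 128) m + n % 128
        = 2 ^ (6 + 1) * pvG (n / 128) m + (2 ^ 6 * (n / 64 % 2) + n % 64) from by omega,
    show (14 : Int) = ((6 + 8 : Nat) : Int) from by norm_num,
    pv_stepB 6 _ _ _ (by omega) h1 (by omega) (by omega)]
  have h2 := pvG_lt _ _ (show n / 64 % 2 < 2 from by omega) h1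
  rw [show 2 ^ 6 * pvG (n / 64 % 2) (pvG (n / 128) m) + n % 64
        = 2 ^ (5 + 1) * pvG (n / 64 % 2) (pvG (n / 128) m) + (2 ^ 5 * (n / 32 % 2) + n % 32) from by omega,
    show (13 : Int) = ((5 + 8 : Nat) : Int) from by norm_num,
    pv_stepB 5 _ _ _ (by omega) h2 (by omega) (by omega)]
  have h3 := pvG_lt _ _ (show n / 32 % 2 < 2 from by omega) h2
  rw [show 2 ^ 5 * pvG (n / 32 % 2) (pvG (n / 64 % 2) (pvG (n / 128) m)) + n % 32
        = 2 ^ (4 + 1) * pvG (n / 32 % 2) (pvG (n / 64 % 2) (pvG (n / 128) m))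
            + (2 ^ 4 * (n / 16 % 2) + n % 16) from by omega,
    show (12 : Int) = ((4 + 8 : Nat) : Int) from by norm_num,
    pv_stepB 4 _ _ _ (by omega) h3 (by omega) (by omega)]
  have h4 := pvG_lt _ _ (show n / 16 % 2 < 2 from by omega) h3
  rw [show 2 ^ 4 * pvG (n / 16 % 2) (pvG (n / 32 % 2) (pvG (n / 64 % 2) (pvG (n / 128) m))) + n % 16
        = 2 ^ (3 + 1) * pvG (n / 16 % 2) (pvG (n / 32 % 2) (pvG (n / 64 % 2) (pvG (n / 128) m)))
            + (2 ^ 3 * (n / 8 % 2) + n % 8) from by omega,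
    show (11 : Int) = ((3 + 8 : Nat) : Int) from by norm_num,
    pv_stepB 3 _ _ _ (by omega) h4 (by omega) (by omega)]
  have h5 := pvG_lt _ _ (show n / 8 % 2 < 2 from by omega) h4
  rw [show 2 ^ 3 * pvG (n / 8 % 2) (pvG (n / 16 % 2) (pvG (n / 32 % 2) (pvG (n / 64 % 2)
            (pvG (n / 128) m)))) + n % 8
        = 2 ^ (2 + 1) * pvG (n / 8 % 2) (pvG (n / 16 % 2) (pvG (n / 32 % 2) (pvG (n / 64 % 2)
            (pvG (n / 128) m)))) + (2 ^ 2 * (n / 4 % 2) + n % 4) from by omega,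
    show (10 : Int) = ((2 + 8 : Nat) : Int) from by norm_num,
    pv_stepB 2 _ _ _ (by omega) h5 (by omega) (by omega)]
  have h6 := pvG_lt _ _ (show n / 4 % 2 < 2 from by omega) h5
  rw [show 2 ^ 2 * pvG (n / 4 % 2) (pvG (n / 8 % 2) (pvG (n / 16 % 2) (pvG (n / 32 % 2)
            (pvG (n / 64 % 2) (pvG (n / 128) m))))) + n % 4
        = 2 ^ (1 + 1) * pvG (n / 4 % 2) (pvG (n / 8 % 2) (pvG (n / 16 % 2) (pvG (n / 32 % 2)
            (pvG (n / 64 % 2) (pvG (n / 128) m))))) + (2 ^ 1 * (n / 2 % 2) + n % 2) from by omega,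
    show (9 : Int) = ((1 + 8 : Nat) : Int) from by norm_num,
    pv_stepB 1 _ _ _ (by omega) h6 (by omega) (by omega)]
  have h7 := pvG_lt _ _ (show n / 2 % 2 < 2 from by omega) h6
  rw [show 2 ^ 1 * pvG (n / 2 % 2) (pvG (n / 4 % 2) (pvG (n / 8 % 2) (pvG (n / 16 % 2)
            (pvG (n / 32 % 2) (pvG (n / 64 % 2) (pvG (n / 128) m)))))) + n % 2
        = 2 ^ (0 + 1) * pvG (n / 2 % 2) (pvG (n / 4 % 2) (pvG (n / 8 % 2) (pvG (n / 16 % 2)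
            (pvG (n / 32 % 2) (pvG (n / 64 % 2) (pvG (n / 128) m)))))) + (2 ^ 0 * (n % 2) + 0) from by omega,
    show (8 : Int) = ((0 + 8 : Nat) : Int) from by norm_num,
    pv_stepB 0 _ _ _ (by omega) h7 (by omega) (by omega)]
  unfold pvChain
  norm_num

-- both ports only depend on the inputs modulo 256
theorem pv_stepA_cong (a c : Int) : crcStepA (a, c) = crcStepA (a % 256, c % 256) := by
  unfold crcStepA
  simp only [pv_shr7, pv_shl1, pv_band1, pv_band255]
  rw [show a * 2 % 256 = a % 256 * 2 % 256 from by omega,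
    show a / 128 % 2 = a % 256 / 128 % 2 from by omega,
    show c * 2 % 256 = c % 256 * 2 % 256 from by omega,
    show c / 128 % 2 = c % 256 / 128 % 2 from by omega]

theorem pv_maskA (a c : Int) : crc_step_py a c = crc_step_py (a % 256) (c % 256) := by
  unfold crc_step_py
  rw [show List.range 8 = [0, 1, 2, 3, 4, 5, 6, 7] from rfl]
  simp only [List.foldl_cons]
  rw [pv_stepA_cong a c]

theorem pv_maskB (a c : Int) : crc_step_py_alt a c = crc_step_py_alt (a % 256) (c % 256) := by
  unfold crc_step_py_alt
  rw [pv_band255, pv_band255, pv_band255, pv_band255,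
    show a % 256 % 256 = a % 256 from by omega,
    show c % 256 % 256 = c % 256 from by omega]

-- ===== VERDICT =====
theorem crc_step_py_spec : Claim_equal_crc_step_py := by
  intro a c _
  unfold Spec_crc_step_py
  rw [pv_maskA, pv_maskB]
  have hn : a % 256 = (((a % 256).toNat : Nat) : Int) := by omega
  have hm : c % 256 = (((c % 256).toNat : Nat) : Int) := by omega
  rw [hn, hm, pv_portA _ _ (by omega) (by omega), pv_portB _ _ (by omega) (by omega)]
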